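-- pv_equiv track=rewrite | github.com/pypi-data/pypi-mirror-401 | packages/stanlogic/stanlogic-2.1.0-py3-none-any.whl/stanlogic/BoolMinGeo.py | _str_to_bitwise
-- ===== SOURCE A (Python) =====
-- def _str_to_bitwise(term_str):
--     """
--     Convert string with '-' to bitwise representation (value, mask).
--
--     Args:
--         term_str: Binary string with possible '-'
--
--     Returns:
--         tuple: (value, mask) where mask has 1 for fixed bits, 0 for don't cares
--
--     Example:
--         "10-1" → (value=0b1001, mask=0b1101)
--                 bits:  1 0 - 1
--                 mask:  1 1 0 1  (1=fixed, 0=don't care)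
--                 value: 1 0 0 1  (don't care treated as 0)
--     """
--     bit_width = len(term_str)
--     value = 0
--     mask = 0
--
--     for i, bit in enumerate(term_str):
--         bit_pos = bit_width - 1 - i  # MSB first
--         if bit != '-':
--             mask |= (1 << bit_pos)  # Mark as fixed
--             if bit == '1':
--                 value |= (1 << bit_pos)  # Set bit
--
--     return value, mask
-- ===== SOURCE B (Python) =====
-- def _str_to_bitwise(term_str):
--     # Staged passes: build two binary strings, then use Python's base-2 parser.
--     if not term_str:
--         return (0, 0)
--     value_str = ''.join('1' if c == '1' else '0' for c in term_str)
--     mask_str = ''.join('0' if c == '-' else '1' for c in term_str)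
--     return (int(value_str, 2), int(mask_str, 2))
-- ===== Notes on version B (the rewrite author's own statement) =====
-- stated objective: faster
-- what changed: Instead of enumerate with bit-position shift/OR accumulation, B maps the ternary string to two plain binary strings (value: '1' where the char is '1'; mask: '0' where it is '-') and converts each with int(_, 2), guarding the empty string; the conversion runs in C instead of a per-bit Python loop.
import Mathlib
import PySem

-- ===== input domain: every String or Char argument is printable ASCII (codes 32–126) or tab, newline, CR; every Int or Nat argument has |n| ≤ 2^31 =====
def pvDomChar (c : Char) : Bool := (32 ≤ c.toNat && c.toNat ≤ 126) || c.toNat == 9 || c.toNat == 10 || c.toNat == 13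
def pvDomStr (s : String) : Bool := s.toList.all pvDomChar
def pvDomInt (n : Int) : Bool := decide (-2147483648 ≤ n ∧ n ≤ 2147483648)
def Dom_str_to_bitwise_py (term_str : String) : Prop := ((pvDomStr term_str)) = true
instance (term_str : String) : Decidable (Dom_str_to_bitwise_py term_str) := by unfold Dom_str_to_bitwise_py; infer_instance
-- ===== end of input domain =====

-- B replaces A's enumerate/bit-position shift-and-OR accumulation by two staged mapping
-- passes producing plain binary strings, converted with a base-2 parse (int(_, 2)).

-- ===== PORT A =====
-- loop 'for i, bit in enumerate(term_str)' with accumulators value, mask.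
-- '1 << bit_pos' is ported as (1 : Int) <<< bitPos.toNat; exact here because on every
-- reachable call 0 ≤ bitPos = len - 1 - i (i ranges over 0 .. len-1).
def pvALoop (bitWidth : Int) : List (Int × Char) → Int → Int → Int × Int
  | [], value, mask => (value, mask)
  | (i, bit) :: rest, value, mask =>
    let bitPos := bitWidth - 1 - i
    if bit ≠ '-' then
      let mask' := PySem.Int.bor mask ((1 : Int) <<< bitPos.toNat)
      let value' := if bit = '1' then PySem.Int.bor value ((1 : Int) <<< bitPos.toNat) else value
      pvALoop bitWidth rest value' mask'
    else
      pvALoop bitWidth rest value mask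

def str_to_bitwise_py (term_str : String) : Int × Int :=
  pvALoop (term_str.toList.length : Int) (PySem.List.enumerate term_str.toList) 0 0

-- ===== PORT B =====
-- port of Python's int(s, 2) on a nonempty string of '0'/'1' characters; exact there
def pvIntOfBin (l : List Char) : Int :=
  l.foldl (fun acc c => acc * 2 + (if c = '1' then 1 else 0)) 0

def str_to_bitwise_py_alt (term_str : String) : Int × Int :=
  let l := term_str.toList
  if l = [] then (0, 0)
  else
    let valueStr := l.map (fun c => if c = '1' then '1' else '0')
    let maskStr := l.map (fun c => if c = '-' then '0' else '1')
    (pvIntOfBin valueStr, pvIntOfBin maskStr)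

-- ===== PRECONDITION & SPEC =====
def Spec_str_to_bitwise_py (term_str : String) (out : Int × Int) : Prop := out = str_to_bitwise_py_alt term_str
instance (term_str : String) (out : Int × Int) : Decidable (Spec_str_to_bitwise_py term_str out) := by unfold Spec_str_to_bitwise_py; infer_instance

-- ===== CLAIM (what is proved, stated in full; the proofs are below) =====
def Claim_equal_str_to_bitwise_py : Prop := ∀ (term_str : String), Dom_str_to_bitwise_py term_str → Spec_str_to_bitwise_py term_str (str_to_bitwise_py term_str)

-- ===== LEMMAS AND PROOFS =====

-- The MSB-first binary value of the '1'-characters, and of the non-'-' characters.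
def pvV : List Char → Nat
  | [] => 0
  | c :: r => (if c = '1' then 2 ^ r.length else 0) + pvV r

def pvM : List Char → Nat
  | [] => 0
  | c :: r => (if c = '-' then 0 else 2 ^ r.length) + pvM r

-- OR of a fresh low bit into a number whose set bits all lie strictly above it is addition.
theorem pv_lor_key (k w : Nat) : (w * 2 ^ (k + 1)) ||| 2 ^ k = w * 2 ^ (k + 1) + 2 ^ k := by
  induction k generalizing w with
  | zero =>
    calc w * 2 ^ 1 ||| 2 ^ 0 = Nat.bit false w ||| Nat.bit true 0 := by
          congr 1 <;> (simp [Nat.bit]; ring)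
      _ = Nat.bit true (w ||| 0) := Nat.lor_bit false w true 0
      _ = w * 2 ^ 1 + 2 ^ 0 := by simp [Nat.bit]; ring
  | succ k ih =>
    calc w * 2 ^ (k + 1 + 1) ||| 2 ^ (k + 1)
        = Nat.bit false (w * 2 ^ (k + 1)) ||| Nat.bit false (2 ^ k) := by
          congr 1 <;> (simp [Nat.bit]; ring)
      _ = Nat.bit false (w * 2 ^ (k + 1) ||| 2 ^ k) := by
          simpa using Nat.lor_bit false (w * 2 ^ (k + 1)) false (2 ^ k)
      _ = w * 2 ^ (k + 1 + 1) + 2 ^ (k + 1) := by rw [ih]; simp [Nat.bit]; ring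

theorem pv_bor_cast (k w : Nat) :
    PySem.Int.bor ((w * 2 ^ (k + 1) : Nat) : Int) ((1 : Int) <<< k)
      = (((2 * w + 1) * 2 ^ k : Nat) : Int) := by
  have h : ((1 : Int) <<< k) = ((2 ^ k : Nat) : Int) := by simp [Int.shiftLeft_eq]
  rw [h, PySem.Int.bor_natCast, pv_lor_key]
  congr 1
  ring

theorem pvALoop_spec (l : List Char) (s wv wm : Nat) :
    pvALoop ((s : Int) + l.length) (PySem.List.enumerate l s)
        ((wv * 2 ^ l.length : Nat) : Int) ((wm * 2 ^ l.length : Nat) : Int)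
      = (((wv * 2 ^ l.length + pvV l : Nat) : Int), ((wm * 2 ^ l.length + pvM l : Nat) : Int)) := by
  induction l generalizing s wv wm with
  | nil => simp [pvALoop, PySem.List.enumerate_nil, pvV, pvM]
  | cons c r ih =>
    rw [PySem.List.enumerate_cons]
    have hlen : ∀ w : Nat, (w * 2 ^ (c :: r).length : Nat) = w * 2 ^ (r.length + 1) := by
      intro w; simp [List.length_cons]
    have hw : ((s : Int) + ((c :: r).length : Int)) = ((s + 1 : Nat) : Int) + (r.length : Int) := by
      push_cast [List.length_cons]; ring
    have hcast : ((s : Int) + 1) = ((s + 1 : Nat) : Int) := by push_cast; ring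
    have hpos : (((s : Int) + ((c :: r).length : Int)) - 1 - (s : Int)).toNat = r.length := by
      simp only [List.length_cons]; omega
    have hsplit : ∀ w : Nat, (w * 2 ^ (r.length + 1) : Nat) = (2 * w) * 2 ^ r.length := by
      intro w; rw [Nat.pow_succ]; ring
    by_cases hd : c = '-'
    · subst hd
      simp only [pvALoop, ne_eq, Char.reduceEq, reduceIte]
      rw [hlen wv, hlen wm, hsplit wv, hsplit wm, hw, hcast, ih]
      simp [pvV, pvM]
    · by_cases h1 : c = '1'
      · subst h1
        simp only [pvALoop, ne_eq, Char.reduceEq, reduceIte]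
        rw [hpos, hlen wv, hlen wm, pv_bor_cast r.length wv, pv_bor_cast r.length wm,
          hw, hcast, ih]
        simp [pvV, pvM, Nat.pow_succ]
        constructor <;> ring
      · simp only [pvALoop]
        rw [if_pos hd, if_neg h1, hpos, hlen wv, hlen wm, hsplit wv,
          pv_bor_cast r.length wm, hw, hcast, ih]
        simp [pvV, pvM, Nat.pow_succ, if_neg h1, if_neg hd]
        ring

-- B's base-2 parse, characterised by pvV.
theorem pvParse_spec (l : List Char) (w : Nat) :
    l.foldl (fun acc c => acc * 2 + (if c = '1' then 1 else 0)) ((w : Nat) : Int)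
      = ((w * 2 ^ l.length + pvV l : Nat) : Int) := by
  induction l generalizing w with
  | nil => simp
  | cons c r ih =>
    simp only [List.foldl_cons]
    have hv : ((w : Int) * 2 + (if c = '1' then 1 else 0))
        = (((2 * w + (if c = '1' then 1 else 0) : Nat) : Int)) := by
      split_ifs <;> push_cast <;> ring
    rw [hv, ih]
    simp [pvV, Nat.pow_succ]
    split_ifs <;> ring

theorem pvV_map_val (l : List Char) :
    pvV (l.map (fun c => if c = '1' then '1' else '0')) = pvV l := by
  induction l with
  | nil => rfl
  | cons c r ih =>
    by_cases h : c = '1' <;> simp [pvV, h, ih]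

theorem pvV_map_mask (l : List Char) :
    pvV (l.map (fun c => if c = '-' then '0' else '1')) = pvM l := by
  induction l with
  | nil => rfl
  | cons c r ih =>
    by_cases h : c = '-' <;> simp [pvV, pvM, h, ih]

-- ===== VERDICT (by name: the statement is the Claim_ definition above) =====
theorem str_to_bitwise_py_spec : Claim_equal_str_to_bitwise_py := by
  intro t _
  unfold Spec_str_to_bitwise_py str_to_bitwise_py str_to_bitwise_py_alt pvIntOfBin
  have hA := pvALoop_spec t.toList 0 0 0
  simp only [Nat.cast_zero, zero_add, zero_mul] at hA
  rw [hA]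
  by_cases h : t.toList = []
  · simp [h, pvV, pvM]
  · simp only [h, if_false]
    have h1 := pvParse_spec (t.toList.map (fun c => if c = '1' then '1' else '0')) 0
    have h2 := pvParse_spec (t.toList.map (fun c => if c = '-' then '0' else '1')) 0
    simp only [Nat.cast_zero, zero_mul, zero_add, pvV_map_val, pvV_map_mask] at h1 h2
    rw [h1, h2]
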